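-- pv_equiv track=rewrite | github.com/krishnacse2010/leetcode | isomorphicString.py | getListVal
-- ===== SOURCE A (Python) =====
-- def getListVal(str1):
--     #hash map with pos as value and char as key
--     index_mapping = {}
--     #final value to be checked ,list of pos/rep pos
--     posList = []
--
--     for pos , val in enumerate(str1):
--         if val not in index_mapping:
--             index_mapping[val] = pos
--         posList.append(index_mapping[val])
--     return posList
-- ===== SOURCE B (Python) =====
-- def getListVal(str1):
--     # Character-centric algorithm: one scan per distinct character.
--     # Each pass marks every position of that character with the character's
--     # first-occurrence index; passes touch disjoint positions, so the result
--     # does not depend on the iteration order of the set.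
--     out = [0] * len(str1)
--     for c in set(str1):
--         first = -1
--         for i, ch in enumerate(str1):
--             if ch == c:
--                 if first < 0:
--                     first = i
--                 out[i] = first
--     return out
-- ===== Notes on version B (the rewrite author's own statement) =====
-- stated objective: alternative
-- what changed: Replaces the single incremental pass with a dict by a character-centric algorithm: for each distinct character one dedicated scan fills all of that character's positions with its first-occurrence index, writing into a preallocated output array; the passes touch disjoint positions so set order is irrelevant.
import Mathlib
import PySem

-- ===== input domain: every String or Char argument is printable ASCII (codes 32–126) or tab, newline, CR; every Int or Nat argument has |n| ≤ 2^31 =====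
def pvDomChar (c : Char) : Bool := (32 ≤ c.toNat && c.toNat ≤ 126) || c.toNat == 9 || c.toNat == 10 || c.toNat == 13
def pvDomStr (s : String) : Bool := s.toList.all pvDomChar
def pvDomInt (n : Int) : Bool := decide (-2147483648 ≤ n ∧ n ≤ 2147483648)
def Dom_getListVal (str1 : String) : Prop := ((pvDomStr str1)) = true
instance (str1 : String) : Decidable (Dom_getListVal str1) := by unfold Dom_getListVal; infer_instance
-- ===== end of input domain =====

-- B replaces A's incremental dict pass by a character-centric algorithm: one scan per
-- distinct character fills that character's positions with its first-occurrence index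
-- in a preallocated output array (objective: alternative; passes are disjoint, so the
-- set's iteration order cannot affect the result).


-- ===== PORT A =====
-- literal transliteration: dict of first positions built in one pass; append the looked-up position
def getListVal (str1 : String) : List Int :=
  (((PySem.List.enumerate str1.toList 0).foldl
    (fun (st : PySem.Dict Char Int × List Int) pv =>
      let d := if st.1.contains pv.2 then st.1 else st.1.insert pv.2 pv.1
      (d, st.2 ++ [d.getD pv.2 0]))
    (PySem.Dict.empty, [])) : PySem.Dict Char Int × List Int).2

-- ===== PORT B =====
-- inner 'for i, ch in enumerate(str1)' loop of Source B for one character c: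
-- the enumerate index is always nonnegative, so a Nat counter is exact here
def pvInner (c : Char) : List Char → Nat → Int → List Int → Int × List Int
  | [], _, first, out => (first, out)
  | ch :: rest, i, first, out =>
    if ch = c then
      let first' := if first < 0 then (i : Int) else first
      pvInner c rest (i + 1) first' (out.set i first')
    else
      pvInner c rest (i + 1) first out

-- out = [0]*len(str1); one pvInner pass per element of set(str1)
def getListVal_alt (str1 : String) : List Int :=
  (PySem.Set.ofList str1.toList).foldl
    (fun out c => (pvInner c str1.toList 0 (-1) out).2)
    (List.replicate str1.toList.length 0)

-- ===== PRECONDITION & SPEC =====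
def Spec_getListVal (str1 : String) (out : List Int) : Prop := out = getListVal_alt str1
instance (str1 : String) (out : List Int) : Decidable (Spec_getListVal str1 out) := by unfold Spec_getListVal; infer_instance

-- ===== CLAIM (what is proved, stated in full; the proofs are below) =====
def Claim_equal_getListVal : Prop := ∀ (str1 : String), Dom_getListVal str1 → Spec_getListVal str1 (getListVal str1)

-- ===== LEMMAS AND PROOFS =====

-- the common value both programs compute per character: its first-occurrence index
def pvFI (s : List Char) (c : Char) : Int := (((PySem.List.index? s c).getD 0 : Nat) : Int)

theorem pv_FI_of_index (s : List Char) (v : Char) (n : Nat)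
    (h : PySem.List.index? s v = some n) : pvFI s v = (n : Int) := by
  unfold pvFI; rw [h]; rfl

-- first-occurrence index of v in pre ++ v :: suf when v ∉ pre
theorem pv_index_first (pre suf : List Char) (v : Char) (hv : v ∉ pre) :
    PySem.List.index? (pre ++ v :: suf) v = some pre.length := by
  rw [PySem.List.index?_eq_some_iff]
  exact ⟨pre, suf, rfl, rfl, hv⟩

theorem pv_set_append_length {α : Type} (l₁ : List α) (x v : α) (l₂ : List α) :
    (l₁ ++ x :: l₂).set l₁.length v = l₁ ++ v :: l₂ := by
  induction l₁ with
  | nil => simp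
  | cons a l ih => simp [ih]

-- loop invariant for A's fold
theorem pv_fold_inv (l : List Char) :
    ∀ (suf pre : List Char) (d : PySem.Dict Char Int) (acc : List Int),
      l = pre ++ suf →
      (∀ c, d.contains c = true ↔ c ∈ pre) →
      (∀ c ∈ pre, d.getD c 0 = pvFI l c) →
      (((PySem.List.enumerate suf (pre.length : Int)).foldl
        (fun (st : PySem.Dict Char Int × List Int) pv =>
          let d := if st.1.contains pv.2 then st.1 else st.1.insert pv.2 pv.1
          (d, st.2 ++ [d.getD pv.2 0]))
        (d, acc)) : PySem.Dict Char Int × List Int).2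
      = acc ++ suf.map (pvFI l) := by
  intro suf
  induction suf with
  | nil => intro pre d acc _ _ _; simp [PySem.List.enumerate_nil]
  | cons v suf' ih =>
    intro pre d acc hl hcont hval
    rw [PySem.List.enumerate_cons, List.foldl_cons]
    by_cases hmem : v ∈ pre
    · have hc : d.contains v = true := (hcont v).mpr hmem
      simp only [hc, if_true]
      have h1 : ((pre.length : Int) + 1) = ((pre ++ [v]).length : Int) := by simp
      have hl' : l = (pre ++ [v]) ++ suf' := by simpa using hl
      have := ih (pre ++ [v]) d (acc ++ [d.getD v 0]) hl'
        (by intro c; rw [hcont c]; simp only [List.mem_append, List.mem_singleton]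
            constructor
            · exact Or.inl
            · rintro (h | h)
              · exact h
              · exact h ▸ hmem)
        (by intro c hc'
            rcases List.mem_append.mp hc' with h | h
            · exact hval c h
            · exact (List.mem_singleton.mp h) ▸ hval v hmem)
      rw [h1, this, hval v hmem]
      simp
    · have hc : d.contains v = false := by
        by_contra h
        simp only [Bool.not_eq_false] at h
        exact hmem ((hcont v).mp h)
      simp only [hc, Bool.false_eq_true, if_false]
      have hfv : PySem.List.index? l v = some pre.length := by
        rw [hl]; exact pv_index_first pre suf' v hmem
      have hl' : l = (pre ++ [v]) ++ suf' := by simpa using hl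
      have h1 : ((pre.length : Int) + 1) = ((pre ++ [v]).length : Int) := by simp
      have := ih (pre ++ [v]) (d.insert v (pre.length : Int)) (acc ++ [(d.insert v (pre.length : Int)).getD v 0]) hl'
        (by intro c
            rw [PySem.Dict.contains_insert]
            simp only [List.mem_append, List.mem_singleton, Bool.or_eq_true, beq_iff_eq]
            rw [hcont c]; tauto)
        (by intro c hc'
            rcases List.mem_append.mp hc' with h | h
            · have hne : c ≠ v := fun he => hmem (he ▸ h)
              rw [PySem.Dict.getD_insert_of_ne d _ _ hne]
              exact hval c h
            · have he : c = v := List.mem_singleton.mp h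
              rw [he, PySem.Dict.getD_insert_self, pv_FI_of_index l v _ hfv])
      rw [h1, this, PySem.Dict.getD_insert_self]
      simp [pv_FI_of_index l v _ hfv]

-- B's inner pass turns 's.map f' into 's.map (override at c with pvFI s c)'
theorem pv_inner_spec (s : List Char) (c : Char) :
    ∀ (suf pre : List Char) (first : Int) (f : Char → Int),
      s = pre ++ suf →
      (c ∈ pre → first = pvFI s c) →
      (c ∉ pre → first = -1) →
      (pvInner c suf pre.length first
        (pre.map (fun ch => if ch = c then pvFI s c else f ch) ++ suf.map f)).2
      = s.map (fun ch => if ch = c then pvFI s c else f ch) := by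
  intro suf
  induction suf with
  | nil =>
    intro pre first f hl _ _
    subst hl; simp [pvInner]
  | cons v suf' ih =>
    intro pre first f hl hin hout
    by_cases hv : v = c
    · subst hv
      have hfirst' : (if first < 0 then ((pre.length : Nat) : Int) else first) = pvFI s v := by
        by_cases hmem : v ∈ pre
        · have h := hin hmem
          have hnn : ¬ first < 0 := by
            rw [h]; unfold pvFI; omega
          rw [if_neg hnn, h]
        · have h := hout hmem
          have hidx : PySem.List.index? s v = some pre.length := by
            rw [hl]; exact pv_index_first pre suf' v hmem
          rw [pv_FI_of_index s v _ hidx]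
          simp [h]
    -- the write out[i] = first' lands exactly at position pre.length
      simp only [pvInner, if_true]
      rw [hfirst']
      have hset : ((pre.map (fun ch => if ch = v then pvFI s v else f ch) ++ (v :: suf').map f).set
          pre.length (pvFI s v))
          = (pre ++ [v]).map (fun ch => if ch = v then pvFI s v else f ch) ++ suf'.map f := by
        have hlen : pre.length = (pre.map (fun ch => if ch = v then pvFI s v else f ch)).length := by
          simp
        rw [List.map_cons, hlen, pv_set_append_length]
        simp
      rw [hset]
      have hl' : s = (pre ++ [v]) ++ suf' := by simpa using hl
      have h1 : pre.length + 1 = (pre ++ [v]).length := by simp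
      rw [h1]
      exact ih (pre ++ [v]) (pvFI s v) f hl' (fun _ => rfl)
        (by intro h; exact absurd (by simp) h)
    · simp only [pvInner, if_neg hv]
      have hmv : (fun ch => if ch = c then pvFI s c else f ch) v = f v := by simp [hv]
      have hout' : pre.map (fun ch => if ch = c then pvFI s c else f ch) ++ (v :: suf').map f
          = (pre ++ [v]).map (fun ch => if ch = c then pvFI s c else f ch) ++ suf'.map f := by
        simp [hmv]
      rw [hout']
      have hl' : s = (pre ++ [v]) ++ suf' := by simpa using hl
      have h1 : pre.length + 1 = (pre ++ [v]).length := by simp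
      rw [h1]
      exact ih (pre ++ [v]) first f hl'
        (by intro h
            rcases List.mem_append.mp h with h | h
            · exact hin h
            · exact absurd (List.mem_singleton.mp h).symm hv)
        (by intro h; exact hout (fun hc => h (List.mem_append.mpr (Or.inl hc))))

-- B's outer fold over any character list
theorem pv_outer (s : List Char) :
    ∀ (L : List Char) (f : Char → Int),
      (L.foldl (fun out c => (pvInner c s 0 (-1) out).2) (s.map f))
      = s.map (fun ch => if ch ∈ L then pvFI s ch else f ch) := by
  intro L
  induction L with
  | nil => intro f; simp
  | cons c L' ih =>
    intro f
    rw [List.foldl_cons]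
    have hstep : (pvInner c s 0 (-1) (s.map f)).2
        = s.map (fun ch => if ch = c then pvFI s ch else f ch) := by
      have := pv_inner_spec s c s [] (-1) f (by simp) (by simp) (fun _ => rfl)
      simp only [List.map_nil, List.nil_append, List.length_nil] at this
      rw [this]
      exact List.map_congr_left (by intro a _; by_cases h : a = c <;> simp [h])
    rw [hstep, ih]
    exact List.map_congr_left (by
      intro a _
      by_cases h1 : a ∈ L' <;> by_cases h2 : a = c <;> simp [h1, h2])

-- ===== VERDICT (by name: the statement is the Claim_ definition above) =====
theorem getListVal_spec : Claim_equal_getListVal := by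
  intro str1 _
  unfold Spec_getListVal
  have hA : getListVal str1 = str1.toList.map (pvFI str1.toList) := by
    unfold getListVal
    have := pv_fold_inv str1.toList str1.toList [] PySem.Dict.empty []
      (by simp)
      (by intro c; simp [PySem.Dict.contains_empty])
      (by intro c hc; simp at hc)
    simpa using this
  have hB : getListVal_alt str1 = str1.toList.map (pvFI str1.toList) := by
    unfold getListVal_alt
    have hrep : List.replicate str1.toList.length (0 : Int)
        = str1.toList.map (fun _ => 0) := by
      simp
    rw [hrep, pv_outer]
    exact List.map_congr_left (by
      intro a ha
      simp [PySem.Set.mem_ofList, ha])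
  rw [hA, hB]
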